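-- pv_equiv track=rewrite | github.com/hmahadik/traq | scripts/merge_fragmented_sessions.py | build_merge_chains
-- ===== SOURCE A (Python) =====
-- def build_merge_chains(pairs: list) -> list:
--     """Build chains of sessions to merge (handles multiple consecutive restarts).
--
--     Returns list of lists, where each inner list contains session IDs to merge.
--     Example: [[101, 102, 103], [200, 201]] means merge 101+102+103 and 200+201
--     """
--     if not pairs:
--         return []
--
--     chains = []
--     current_chain = [pairs[0][0], pairs[0][1]]  # Start with first pair's IDs
--
--     for i in range(1, len(pairs)):
--         s1_id, s2_id = pairs[i][0], pairs[i][1]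
--
--         # If this pair continues the current chain
--         if s1_id == current_chain[-1]:
--             current_chain.append(s2_id)
--         else:
--             # Start a new chain
--             chains.append(current_chain)
--             current_chain = [s1_id, s2_id]
--
--     chains.append(current_chain)
--     return chains
-- ===== SOURCE B (Python) =====
-- def build_merge_chains(pairs: list) -> list:
--     """Break-point decomposition: find the indices where a new chain starts,
--     then slice the pair list into connected groups and map each group to a chain."""
--     if not pairs:
--         return []
--     n = len(pairs)
--     breaks = [i for i in range(1, n) if pairs[i][0] != pairs[i - 1][1]]
--     chains = []
--     lo = 0
--     for hi in breaks + [n]: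
--         group = pairs[lo:hi]
--         chains.append([group[0][0]] + [p[1] for p in group])
--         lo = hi
--     return chains
-- ===== Notes on version B (the rewrite author's own statement) =====
-- stated objective: alternative
-- what changed: Replaces A's single accumulator loop (growing a current_chain and comparing each pair's first id to its last element) with a two-phase decomposition: one pass collects the break indices i where pairs[i][0] != pairs[i-1][1], then the pair list is sliced at those boundaries and each slice is mapped to a chain.
-- outside the precondition, e.g. on build_merge_chains([[1]]): A raises IndexError, B raises IndexError
import Mathlib
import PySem

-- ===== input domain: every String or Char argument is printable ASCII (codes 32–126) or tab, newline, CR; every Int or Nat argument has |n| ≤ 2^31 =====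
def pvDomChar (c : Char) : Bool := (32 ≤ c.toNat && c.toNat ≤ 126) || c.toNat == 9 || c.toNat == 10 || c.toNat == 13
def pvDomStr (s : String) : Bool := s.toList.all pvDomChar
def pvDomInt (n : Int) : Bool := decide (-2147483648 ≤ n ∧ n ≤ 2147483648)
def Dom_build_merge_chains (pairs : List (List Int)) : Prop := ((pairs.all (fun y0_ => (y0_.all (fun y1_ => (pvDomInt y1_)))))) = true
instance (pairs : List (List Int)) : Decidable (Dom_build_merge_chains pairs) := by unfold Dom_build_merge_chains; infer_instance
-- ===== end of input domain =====

-- B re-decomposes A's single accumulator loop into break-point detection plus slicing; objective: alternative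
-- (same linear cost, different decomposition).

-- ===== PORT A =====
-- pairs[i][0] and pairs[i][1]
def pvFst (p : List Int) : Int := PySem.List.pyGetD p 0 0
def pvSnd (p : List Int) : Int := PySem.List.pyGetD p 1 0

-- the body of A's for-loop: state = (chains, current_chain)
def pvA_step (st : List (List Int) × List Int) (p : List Int) : List (List Int) × List Int :=
  if pvFst p = PySem.List.pyGetD st.2 (-1) 0 then (st.1, st.2 ++ [pvSnd p])
  else (st.1 ++ [st.2], [pvFst p, pvSnd p])

def build_merge_chains (pairs : List (List Int)) : List (List Int) :=
  match pairs with
  | [] => []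
  | _ :: _ =>
    let st := (PySem.List.pyRange 1 (PySem.List.len pairs) 1).foldl
      (fun st i => pvA_step st (PySem.List.pyGetD pairs i []))
      ([], [pvFst (PySem.List.pyGetD pairs 0 []), pvSnd (PySem.List.pyGetD pairs 0 [])])
    st.1 ++ [st.2]

-- ===== PORT B =====
-- pairs[i][0] != pairs[i-1][1] : a new chain starts at index i
def pvPred (pairs : List (List Int)) (i : Int) : Bool :=
  pvFst (PySem.List.pyGetD pairs i []) != pvSnd (PySem.List.pyGetD pairs (i - 1) [])

-- [i for i in range(1, n) if pairs[i][0] != pairs[i-1][1]]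
def pvBreaks (pairs : List (List Int)) : List Int :=
  (PySem.List.pyRange 1 (PySem.List.len pairs) 1).filter (pvPred pairs)

-- the body of B's for-loop: state = (chains, lo); group = pairs[lo:hi]
def pvB_chunk (pairs : List (List Int)) (st : List (List Int) × Int) (hi : Int) :
    List (List Int) × Int :=
  let group := PySem.List.slice pairs (some st.2) (some hi)
  (st.1 ++ [[pvFst (PySem.List.pyGetD group 0 [])] ++ group.map pvSnd], hi)

def build_merge_chains_alt (pairs : List (List Int)) : List (List Int) :=
  match pairs with
  | [] => []
  | _ :: _ =>
    ((pvBreaks pairs ++ [PySem.List.len pairs]).foldl (pvB_chunk pairs) ([], 0)).1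

-- ===== PRECONDITION & SPEC =====
-- Pre_ excludes inputs containing an inner list with fewer than 2 elements, on which the
-- Python A (and B) raises IndexError when reading pairs[i][0] / pairs[i][1].
def Pre_build_merge_chains (pairs : List (List Int)) : Prop := ∀ p ∈ pairs, 2 ≤ p.length
instance (pairs : List (List Int)) : Decidable (Pre_build_merge_chains pairs) := by
  unfold Pre_build_merge_chains; infer_instance

def pvWitness_build_merge_chains : List (List Int) := [[101, 102], [102, 103], [200, 201]]

def Spec_build_merge_chains (pairs : List (List Int)) (out : List (List Int)) : Prop :=
  out = build_merge_chains_alt pairs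
instance (pairs : List (List Int)) (out : List (List Int)) :
    Decidable (Spec_build_merge_chains pairs out) := by
  unfold Spec_build_merge_chains; infer_instance

-- ===== CLAIM (what is proved, stated in full; the proofs are below) =====
def Claim_equal_build_merge_chains : Prop :=
  ∀ (pairs : List (List Int)), Dom_build_merge_chains pairs →
    Pre_build_merge_chains pairs →
      Spec_build_merge_chains pairs (build_merge_chains pairs)

-- ===== LEMMAS AND PROOFS =====

-- canonical recursive form both ports are reduced to (proof-only helper)
def pvCanon : List Int → List (List Int) → List (List Int)
  | cur, [] => [cur]
  | cur, p :: ps =>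
    if pvFst p = PySem.List.pyGetD cur (-1) 0 then pvCanon (cur ++ [pvSnd p]) ps
    else cur :: pvCanon [pvFst p, pvSnd p] ps

def pvCanonTop : List (List Int) → List (List Int)
  | [] => []
  | p :: ps => pvCanon [pvFst p, pvSnd p] ps

-- ===== A-side =====
lemma pvA_fold (ps : List (List Int)) : ∀ acc cur,
    (ps.foldl pvA_step (acc, cur)).1 ++ [(ps.foldl pvA_step (acc, cur)).2]
      = acc ++ pvCanon cur ps := by
  induction ps with
  | nil => intro acc cur; simp [pvCanon]
  | cons p ps ih =>
    intro acc cur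
    simp only [List.foldl_cons, pvA_step, pvCanon]
    by_cases h : pvFst p = PySem.List.pyGetD cur (-1) 0
    · simp [h, ih]
    · simp [h, ih, List.append_assoc]

lemma pvA_eq_canonTop (pairs : List (List Int)) :
    build_merge_chains pairs = pvCanonTop pairs := by
  match pairs with
  | [] => rfl
  | p :: ps =>
    show ((PySem.List.pyRange 1 (PySem.List.len (p :: ps)) 1).foldl
        (fun st i => pvA_step st (PySem.List.pyGetD (p :: ps) i []))
        ([], [pvFst (PySem.List.pyGetD (p :: ps) 0 []), pvSnd (PySem.List.pyGetD (p :: ps) 0 [])])).1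
      ++ [_] = _
    rw [PySem.List.foldl_pyRange_pyGetD (p :: ps) [] pvA_step _ (by norm_num)]
    simp only [PySem.List.pyGetD_zero_cons, Int.toNat_one, List.drop_one, List.tail_cons]
    rw [pvA_fold]
    simp [pvCanonTop]

-- ===== canonical-form cons characterisations =====
lemma pvCanon_cons (ps : List (List Int)) : ∀ (x : Int) (cur : List Int), cur ≠ [] →
    pvCanon (x :: cur) ps = (x :: (pvCanon cur ps).headI) :: (pvCanon cur ps).tail := by
  induction ps with
  | nil => intro x cur h; simp [pvCanon]
  | cons p ps ih =>
    intro x cur h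
    have hlast : PySem.List.pyGetD (x :: cur) (-1) 0 = PySem.List.pyGetD cur (-1) 0 := by
      rw [PySem.List.pyGetD_neg_one _ _ (by simp), PySem.List.pyGetD_neg_one _ _ h]
      exact List.getLast_cons h
    simp only [pvCanon, hlast]
    by_cases hc : pvFst p = PySem.List.pyGetD cur (-1) 0
    · simp only [hc, if_true]
      have : x :: cur ++ [pvSnd p] = x :: (cur ++ [pvSnd p]) := by simp
      rw [this, ih x (cur ++ [pvSnd p]) (by simp)]
    · simp [hc]

-- ===== B-side =====
-- fold with a general accumulator = accumulator ++ fold from []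
lemma pvB_fold_acc (pairs : List (List Int)) (his : List Int) : ∀ acc lo,
    his.foldl (pvB_chunk pairs) (acc, lo)
      = (acc ++ (his.foldl (pvB_chunk pairs) ([], lo)).1,
         (his.foldl (pvB_chunk pairs) ([], lo)).2) := by
  induction his with
  | nil => intro acc lo; simp
  | cons hi his ih =>
    intro acc lo
    simp only [List.foldl_cons, pvB_chunk, List.nil_append]
    rw [ih, ih [_]]
    simp

-- shifting everything one position right
lemma pvB_chunk_shift (p : List Int) (rest : List (List Int)) (lo hi : Int)
    (hlo : 0 ≤ lo) (hhi : 0 ≤ hi) (acc : List (List Int)) :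
    pvB_chunk (p :: rest) (acc, lo + 1) (hi + 1)
      = ((pvB_chunk rest (acc, lo) hi).1, (pvB_chunk rest (acc, lo) hi).2 + 1) := by
  obtain ⟨l, rfl⟩ : ∃ l : Nat, lo = (l : Int) := ⟨lo.toNat, (Int.toNat_of_nonneg hlo).symm⟩
  obtain ⟨h, rfl⟩ : ∃ h : Nat, hi = (h : Int) := ⟨hi.toNat, (Int.toNat_of_nonneg hhi).symm⟩
  have hsl : PySem.List.slice (p :: rest) (some ((l : Int) + 1)) (some ((h : Int) + 1))
      = PySem.List.slice rest (some (l : Int)) (some (h : Int)) := by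
    have h1 : ((l : Int) + 1) = ((l + 1 : Nat) : Int) := by push_cast; ring
    have h2 : ((h : Int) + 1) = ((h + 1 : Nat) : Int) := by push_cast; ring
    rw [h1, h2, PySem.List.slice_natCast, PySem.List.slice_natCast]
    simp [Nat.succ_sub_succ]
  simp only [pvB_chunk, hsl]

lemma pvB_fold_shift (p : List Int) (rest : List (List Int)) (his : List Int) :
    ∀ (acc : List (List Int)) (lo : Int), 0 ≤ lo → (∀ h ∈ his, 0 ≤ h) →
    (his.map (· + 1)).foldl (pvB_chunk (p :: rest)) (acc, lo + 1)
      = ((his.foldl (pvB_chunk rest) (acc, lo)).1,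
         (his.foldl (pvB_chunk rest) (acc, lo)).2 + 1) := by
  induction his with
  | nil => intro acc lo _ _; simp
  | cons hi his ih =>
    intro acc lo hlo hall
    have hhi : 0 ≤ hi := hall hi (by simp)
    simp only [List.map_cons, List.foldl_cons]
    rw [pvB_chunk_shift p rest lo hi hlo hhi acc]
    have h2 : (pvB_chunk rest (acc, lo) hi).2 = hi := rfl
    rw [ih _ _ (h2 ▸ hhi) (fun x hx => hall x (by simp [hx]))]

-- every break index is at least 1
lemma pvBreaks_pos (pairs : List (List Int)) :
    ∀ x ∈ pvBreaks pairs, 1 ≤ x := by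
  intro x hx
  have := List.of_mem_filter hx
  have hm := List.mem_of_mem_filter hx
  exact (PySem.List.mem_pyRange_one.mp hm).1

-- xs[i+1] on p :: rest is xs[i] on rest (0 ≤ i)
lemma pvGetD_cons_shift (p : List Int) (rest : List (List Int)) (d : List Int) (i : Int)
    (h : 0 ≤ i) :
    PySem.List.pyGetD (p :: rest) (i + 1) d = PySem.List.pyGetD rest i d := by
  obtain ⟨m, rfl⟩ : ∃ m : Nat, i = (m : Int) := ⟨i.toNat, (Int.toNat_of_nonneg h).symm⟩
  have hc : ((m : Int) + 1) = ((m + 1 : Nat) : Int) := by push_cast; ring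
  rw [hc, PySem.List.pyGetD_natCast, PySem.List.pyGetD_natCast, List.getD_cons_succ]

lemma pvRange_shift (n : Nat) (hn : 1 ≤ n) :
    PySem.List.pyRange 1 ((n : Int) + 1) 1 = 1 :: (PySem.List.pyRange 1 (n : Int) 1).map (· + 1) := by
  rw [PySem.List.pyRange_one, PySem.List.pyRange_one]
  have h1 : (((n : Int) + 1) - 1).toNat = n := by omega
  have h2 : ((n : Int) - 1).toNat = n - 1 := by omega
  rw [h1, h2]
  obtain ⟨m, rfl⟩ := Nat.exists_eq_add_of_le hn
  have h3 : 1 + m = m + 1 := by omega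
  rw [h3, Nat.add_sub_cancel, List.range_succ_eq_map]
  simp only [List.map_cons, List.map_map]
  rw [List.cons_eq_cons]
  refine ⟨by norm_num, List.map_congr_left fun k _ => ?_⟩
  simp only [Function.comp]
  push_cast
  ring

-- the break list of p :: rest, rest nonempty
lemma pvBreaks_cons (p : List Int) (rest : List (List Int)) (hne : rest ≠ []) :
    pvBreaks (p :: rest)
      = (if pvPred (p :: rest) 1 then [1] else []) ++ (pvBreaks rest).map (· + 1) := by
  have hn : 1 ≤ rest.length := List.length_pos_iff.mpr hne
  unfold pvBreaks
  rw [PySem.List.len_eq, PySem.List.len_eq]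
  have hc : (((p :: rest).length : Nat) : Int) = (rest.length : Int) + 1 := by
    push_cast [List.length_cons]; ring
  rw [hc, pvRange_shift rest.length hn, List.filter_cons, List.filter_map]
  have hcong : ∀ x ∈ PySem.List.pyRange 1 (rest.length : Int) 1,
      (pvPred (p :: rest) ∘ (· + 1)) x = pvPred rest x := by
    intro x hx
    obtain ⟨hx1, hx2⟩ := PySem.List.mem_pyRange_one.mp hx
    simp only [Function.comp]
    unfold pvPred
    rw [pvGetD_cons_shift p rest _ x (by omega)]
    have he : x + 1 - 1 = (x - 1) + 1 := by ring
    rw [he, pvGetD_cons_shift p rest _ (x - 1) (by omega)]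
  rw [List.filter_congr hcong]
  split <;> simp

-- pvPred at 1 on p :: r :: t
lemma pvPred_one (p r : List Int) (t : List (List Int)) :
    pvPred (p :: r :: t) 1 = (pvFst r != pvSnd p) := by
  have h1 : PySem.List.pyGetD (p :: r :: t) 1 ([] : List Int) = r := by simp [pysem]
  have h0 : PySem.List.pyGetD (p :: r :: t) (1 - 1) ([] : List Int) = p := by norm_num
  rw [pvPred, h1, h0]

-- pairs[0:m] for a Nat bound
lemma pvSlice_zero (xs : List (List Int)) (m : Nat) :
    PySem.List.slice xs (some (0 : Int)) (some (m : Int)) = xs.take m := by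
  rw [show (0 : Int) = ((0 : Nat) : Int) by norm_num, PySem.List.slice_natCast]
  simp

lemma pvSlice_zero_cons (p : List Int) (xs : List (List Int)) (m : Nat) :
    PySem.List.slice (p :: xs) (some (0 : Int)) (some ((m : Int) + 1)) = p :: xs.take m := by
  rw [show ((m : Int) + 1) = ((m + 1 : Nat) : Int) by push_cast; ring, pvSlice_zero]
  rfl

-- shifting the whole bound list of a fold started at lo = 0, first bound = m ≥ 1
lemma pvB_split (p : List Int) (rest : List (List Int)) (m : Nat) (hm : 1 ≤ m)
    (t1 : List Int) (ht1 : ∀ x ∈ t1, 0 ≤ x) :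
    ((((m : Int) :: t1).map (· + 1)).foldl (pvB_chunk (p :: rest)) ([], 0)).1
      = ([pvFst p, pvSnd p]
          ++ (((((m : Int) :: t1).foldl (pvB_chunk rest) ([], 0)).1).headI).tail)
        :: ((((m : Int) :: t1).foldl (pvB_chunk rest) ([], 0)).1).tail := by
  simp only [List.map_cons, List.foldl_cons]
  have hstep : pvB_chunk (p :: rest) ([], 0) ((m : Int) + 1)
      = ([[pvFst p, pvSnd p] ++ (rest.take m).map pvSnd], (m : Int) + 1) := by
    simp only [pvB_chunk, pvSlice_zero_cons, PySem.List.pyGetD_zero_cons, List.map_cons]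
    rfl
  have hstepR : pvB_chunk rest ([], 0) ((m : Int))
      = ([[pvFst (PySem.List.pyGetD (rest.take m) 0 [])] ++ (rest.take m).map pvSnd],
         (m : Int)) := by
    simp only [pvB_chunk, pvSlice_zero]
    rfl
  rw [hstep, hstepR]
  rw [show ((m : Int) + 1) = ((m : Int)) + 1 by rfl]
  rw [pvB_fold_shift p rest t1 _ (m : Int) (by positivity) ht1]
  rw [pvB_fold_acc rest t1, pvB_fold_acc rest t1 [_]]
  simp

lemma pvLast2 (a b : Int) : PySem.List.pyGetD [a, b] (-1) 0 = b := by
  rw [PySem.List.pyGetD_neg_one _ _ (by simp)]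
  rfl

lemma pvB_eq_canonTop (pairs : List (List Int)) :
    build_merge_chains_alt pairs = pvCanonTop pairs := by
  induction pairs with
  | nil => rfl
  | cons p rest ih =>
    cases rest with
    | nil =>
      show ((pvBreaks [p] ++ [PySem.List.len [p]]).foldl (pvB_chunk [p]) ([], 0)).1 = _
      have hb : pvBreaks [p] = [] := by
        unfold pvBreaks
        rw [PySem.List.len_eq]
        norm_num [PySem.List.pyRange_one]
      rw [hb, PySem.List.len_eq]
      simp only [List.nil_append, List.length_cons, List.length_nil, List.foldl_cons,
        List.foldl_nil]
      simp only [pvB_chunk]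
      rfl
    | cons r t =>
      have hne : (r :: t) ≠ [] := by simp
      have hn : 1 ≤ (r :: t).length := by simp
      show ((pvBreaks (p :: r :: t) ++ [PySem.List.len (p :: r :: t)]).foldl
          (pvB_chunk (p :: r :: t)) ([], 0)).1 = _
      have hihF : ((pvBreaks (r :: t) ++ [((r :: t).length : Int)]).foldl
          (pvB_chunk (r :: t)) ([], 0)).1 = pvCanonTop (r :: t) := by
        rw [← ih]
        show _ = ((pvBreaks (r :: t) ++ [PySem.List.len (r :: t)]).foldl
          (pvB_chunk (r :: t)) ([], 0)).1
        rw [PySem.List.len_eq]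
      have hlen : PySem.List.len (p :: r :: t) = ((r :: t).length : Int) + 1 := by
        rw [PySem.List.len_eq]; push_cast [List.length_cons]; ring
      rw [hlen, pvBreaks_cons p (r :: t) hne, pvPred_one]
      have hnn : ∀ x ∈ pvBreaks (r :: t) ++ [((r :: t).length : Int)], 0 ≤ x := by
        intro x hx
        rcases List.mem_append.mp hx with h | h
        · exact le_trans (by norm_num) (pvBreaks_pos _ x h)
        · simp only [List.mem_singleton] at h; omega
      obtain ⟨h1, t1, hL⟩ : ∃ h1 t1,
          pvBreaks (r :: t) ++ [((r :: t).length : Int)] = h1 :: t1 := by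
        cases pvBreaks (r :: t) <;> exact ⟨_, _, rfl⟩
      have hh1 : 1 ≤ h1 := by
        rcases hB : pvBreaks (r :: t) with _ | ⟨a, l⟩
        · rw [hB] at hL
          simp only [List.nil_append, List.cons.injEq] at hL
          omega
        · rw [hB] at hL
          simp only [List.cons_append, List.cons.injEq] at hL
          exact hL.1 ▸ pvBreaks_pos (r :: t) a (hB ▸ List.mem_cons_self)
      have ht1 : ∀ x ∈ t1, 0 ≤ x := fun x hx => hnn x (hL ▸ List.mem_cons_of_mem _ hx)
      obtain ⟨m, rfl⟩ : ∃ m : Nat, h1 = (m : Int) := ⟨h1.toNat, by omega⟩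
      have hm : 1 ≤ m := by omega
      by_cases hbr : pvFst r = pvSnd p
      · -- pairs[1][0] == pairs[0][1] : the first chain continues
        have hif : (pvFst r != pvSnd p) = false := by simp [hbr]
        rw [hif]
        simp only [if_neg Bool.false_ne_true, List.nil_append]
        have hmap : (pvBreaks (r :: t)).map (· + 1) ++ [((r :: t).length : Int) + 1]
            = (pvBreaks (r :: t) ++ [((r :: t).length : Int)]).map (· + 1) := by simp
        rw [hmap, hL, pvB_split p (r :: t) m hm t1 ht1]
        rw [hL] at hihF
        rw [hihF]
        show _ = pvCanon [pvFst p, pvSnd p] (r :: t)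
        rw [show pvCanon [pvFst p, pvSnd p] (r :: t)
            = if pvFst r = PySem.List.pyGetD [pvFst p, pvSnd p] (-1) 0 then
                pvCanon ([pvFst p, pvSnd p] ++ [pvSnd r]) t
              else [pvFst p, pvSnd p] :: pvCanon [pvFst r, pvSnd r] t from rfl]
        rw [pvLast2, if_pos hbr]
        have hcc : pvCanon ([pvFst p, pvSnd p] ++ [pvSnd r]) t
            = (pvFst p :: (pvCanon [pvSnd p, pvSnd r] t).headI)
              :: (pvCanon [pvSnd p, pvSnd r] t).tail := by
          rw [show ([pvFst p, pvSnd p] ++ [pvSnd r])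
              = pvFst p :: [pvSnd p, pvSnd r] from rfl]
          exact pvCanon_cons t (pvFst p) [pvSnd p, pvSnd r] (by simp)
        rw [hcc]
        have hT : pvCanonTop (r :: t) = pvCanon [pvSnd p, pvSnd r] t := by
          show pvCanon [pvFst r, pvSnd r] t = _
          rw [hbr]
        rw [hT]
        have hhead : (pvCanon [pvSnd p, pvSnd r] t).headI
            = pvSnd p :: (pvCanon [pvSnd r] t).headI := by
          rw [show ([pvSnd p, pvSnd r] : List Int) = pvSnd p :: [pvSnd r] from rfl,
            pvCanon_cons t (pvSnd p) [pvSnd r] (by simp)]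
          rfl
        have htail : (pvCanon [pvSnd p, pvSnd r] t).tail = (pvCanon [pvSnd r] t).tail := by
          rw [show ([pvSnd p, pvSnd r] : List Int) = pvSnd p :: [pvSnd r] from rfl,
            pvCanon_cons t (pvSnd p) [pvSnd r] (by simp)]
          rfl
        rw [hhead, htail]
        rfl
      · -- pairs[1][0] != pairs[0][1] : a new chain starts at index 1
        have hif : (pvFst r != pvSnd p) = true := by simp [hbr]
        rw [hif]
        simp only [if_true, List.cons_append, List.nil_append]
        have hmap : (pvBreaks (r :: t)).map (· + 1) ++ [((r :: t).length : Int) + 1]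
            = (pvBreaks (r :: t) ++ [((r :: t).length : Int)]).map (· + 1) := by simp
        rw [List.foldl_cons]
        have hstep : pvB_chunk (p :: r :: t) ([], 0) 1
            = ([[pvFst p, pvSnd p]], 1) := by
          have h1 : PySem.List.slice (p :: r :: t) (some (0 : Int)) (some (1 : Int))
              = [p] := by
            rw [show (1 : Int) = ((1 : Nat) : Int) by norm_num, pvSlice_zero]
            rfl
          simp only [pvB_chunk]
          rw [h1]
          rfl
        rw [hstep, hmap]
        rw [show ([[pvFst p, pvSnd p]], (1 : Int)) = (([[pvFst p, pvSnd p]], (0 : Int) + 1) :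
          List (List Int) × Int) from rfl]
        rw [pvB_fold_shift p (r :: t) _ _ 0 le_rfl hnn]
        rw [pvB_fold_acc (r :: t) _ [_], hihF]
        show ([[pvFst p, pvSnd p]] ++ pvCanonTop (r :: t)) = pvCanon [pvFst p, pvSnd p] (r :: t)
        rw [show pvCanon [pvFst p, pvSnd p] (r :: t)
            = if pvFst r = PySem.List.pyGetD [pvFst p, pvSnd p] (-1) 0 then
                pvCanon ([pvFst p, pvSnd p] ++ [pvSnd r]) t
              else [pvFst p, pvSnd p] :: pvCanon [pvFst r, pvSnd r] t from rfl]
        rw [pvLast2, if_neg hbr]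
        rfl

-- ===== VERDICT (by name: the statement is the Claim_ definition above) =====
theorem build_merge_chains_spec : Claim_equal_build_merge_chains := by
  intro pairs _ _
  unfold Spec_build_merge_chains
  rw [pvA_eq_canonTop, pvB_eq_canonTop]
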